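-- pv_equiv track=rewrite | github.com/anarkia7115/google-foobar | the_cake_is_not_a_lie.py | answer
-- ===== SOURCE A (Python) =====
-- def answer(s):
--     max_split_size = 0
--     for split_size in range(1, len(s) + 1):
--         i = 0
--         # check is splitable
--         if len(s) % split_size != 0:
--             continue
--
--         chunk_size = len(s) // split_size
--         first_chunk = s[:chunk_size]
--         i += chunk_size
--
--         while i + chunk_size <= len(s):
--             curr_sub_seq = s[i:i+chunk_size]
--             if curr_sub_seq == first_chunk:
--                 i += chunk_size
--             else:
--                 break
--
--         if i == len(s):  # verified
--             max_split_size = split_size  # update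
--
--     return max_split_size
-- ===== SOURCE B (Python) =====
-- def answer(s):
--     # Smallest chunk length c that divides len(s) and is a period of s
--     # (checked by the classic shift-overlap test s[c:] == s[:-c]);
--     # the answer is then len(s) // c. Early-returns at the first (= best) c.
--     n = len(s)
--     for c in range(1, n + 1):
--         if n % c == 0 and s[c:] == s[:n - c]:
--             return n // c
--     return 0
-- ===== Notes on version B (the rewrite author's own statement) =====
-- stated objective: alternative
-- what changed: B replaces A's scan over all split counts with chunk-by-chunk verification by a single ascending scan over chunk lengths using the shift-overlap period test s[c:] == s[:n-c], returning n//c at the first (smallest, hence best) period length.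
import Mathlib
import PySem

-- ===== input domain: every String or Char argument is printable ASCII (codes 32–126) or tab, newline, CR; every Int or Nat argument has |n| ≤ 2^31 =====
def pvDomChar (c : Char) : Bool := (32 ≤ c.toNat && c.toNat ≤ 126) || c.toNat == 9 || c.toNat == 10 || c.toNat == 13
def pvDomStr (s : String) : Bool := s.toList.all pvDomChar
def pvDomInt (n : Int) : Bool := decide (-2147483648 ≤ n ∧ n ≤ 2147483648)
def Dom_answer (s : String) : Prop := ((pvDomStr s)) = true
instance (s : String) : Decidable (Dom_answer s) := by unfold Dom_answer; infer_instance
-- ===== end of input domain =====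

-- B changes the algorithm: instead of A's scan over all split counts verifying chunk by chunk,
-- B scans chunk lengths ascending with the shift-overlap period test s[c:] == s[:n-c] and
-- early-returns n/c at the first (smallest, hence best) valid chunk length.
-- All integer quantities in both programs are nonnegative, so the ports use Nat arithmetic
-- internally (Nat's % and / agree with Python's on nonnegative values); strings are handled as
-- List Char: s[i:j] = (s.toList.drop i).take (j-i), exact per PySem.List.slice_natCast, and
-- range(1, len(s)+1) = List.range' 1 n.

-- ===== PORT A =====
-- the 'while i + chunk_size <= len(s)' loop of A; '0 < c' in the guard only makes the
-- recursion total (every call site has 0 < c, so there it changes nothing)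
def answerWhile (t first : List Char) (c : Nat) (i : Nat) : Nat :=
  if h : 0 < c ∧ i + c ≤ t.length then
    if (t.drop i).take c = first then answerWhile t first c (i + c) else i
  else i
  termination_by t.length - i
  decreasing_by omega

def answer (s : String) : Int :=
  let t := s.toList
  let n := t.length
  (((List.range' 1 n).foldl (fun maxSplit k =>
    if n % k ≠ 0 then maxSplit
    else
      let c := n / k
      let first := t.take c
      let i := answerWhile t first c c
      if i = n then k else maxSplit) 0 : Nat) : Int)

-- ===== PORT B =====
-- the 'for c in range(1, n+1)' loop of B with its early return; falls through to 0 (only n = 0)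
def altGo (t : List Char) (n c : Nat) : Int :=
  if c ≤ n then
    if n % c = 0 ∧ t.drop c = t.take (n - c) then ((n / c : Nat) : Int)
    else altGo t n (c + 1)
  else 0
  termination_by n + 1 - c

def answer_alt (s : String) : Int :=
  altGo s.toList s.toList.length 1

-- ===== PRECONDITION & SPEC =====
def Spec_answer (s : String) (out : Int) : Prop := out = answer_alt s
instance (s : String) (out : Int) : Decidable (Spec_answer s out) := by unfold Spec_answer; infer_instance

-- ===== CLAIM (what is proved, stated in full; the proofs are below) =====
def Claim_equal_answer : Prop := ∀ (s : String), Dom_answer s → Spec_answer s (answer s)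

-- ===== LEMMAS AND PROOFS =====

-- p repeated m times
def repP (p : List Char) (m : Nat) : List Char := (List.replicate m p).flatten

theorem repP_zero (p : List Char) : repP p 0 = [] := rfl

theorem repP_succ (p : List Char) (m : Nat) : repP p (m + 1) = p ++ repP p m := by
  simp [repP, List.replicate_succ]

theorem repP_succ' (p : List Char) (m : Nat) : repP p (m + 1) = repP p m ++ p := by
  simp [repP, List.replicate_succ']

theorem repP_length (p : List Char) (m : Nat) : (repP p m).length = m * p.length := by
  simp [repP]

theorem repP_drop (p : List Char) (m : Nat) (hm : 1 ≤ m) :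
    (repP p m).drop p.length = repP p (m - 1) := by
  obtain ⟨m', rfl⟩ : ∃ m', m = m' + 1 := ⟨m - 1, by omega⟩
  simp [repP_succ]

theorem repP_take (p : List Char) (m : Nat) (hm : 1 ≤ m) :
    (repP p m).take p.length = p := by
  obtain ⟨m', rfl⟩ : ∃ m', m = m' + 1 := ⟨m - 1, by omega⟩
  simp [repP_succ]

-- the shift-overlap test implies the repetition structure
theorem shift_to_rep (c : Nat) (hc : 0 < c) :
    ∀ (m : Nat) (t : List Char), t.length = c * m →
      t.drop c = t.take (t.length - c) → t = repP (t.take c) m := by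
  intro m
  induction m with
  | zero =>
    intro t hlen _
    have : t = [] := List.eq_nil_of_length_eq_zero (by omega)
    simp [this, repP_zero]
  | succ m ih =>
    intro t hlen hshift
    rw [Nat.mul_succ] at hlen
    rcases Nat.eq_zero_or_pos m with hm0 | hmpos
    · subst hm0
      have htake : t.take c = t := List.take_of_length_le (by omega)
      rw [repP_succ, repP_zero, List.append_nil, htake]
    · -- t.length ≥ 2c
      have hcm : c ≤ c * m := Nat.le_mul_of_pos_right c hmpos
      have hulen : (t.drop c).length = c * m := by
        simp [List.length_drop]; omega
      have hutake : (t.drop c).take c = t.take c := by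
        rw [hshift, List.take_take]
        congr 1; omega
      have hushift : (t.drop c).drop c = (t.drop c).take ((t.drop c).length - c) := by
        conv_lhs => rw [hshift, List.drop_take]
        rw [List.length_drop]
      have hrec := ih (t.drop c) hulen hushift
      rw [hutake] at hrec
      calc t = t.take c ++ t.drop c := (List.take_append_drop c t).symm
        _ = t.take c ++ repP (t.take c) m := by rw [hrec]
        _ = repP (t.take c) (m + 1) := (repP_succ _ _).symm

-- the repetition structure implies the shift-overlap test
theorem rep_to_shift (c : Nat) (m : Nat) (t : List Char) (p : List Char)
    (hp : p.length = c) (ht : t = repP p (m + 1)) :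
    t.drop c = t.take (t.length - c) := by
  have hlen : t.length = m * c + c := by rw [ht, repP_length, hp, Nat.succ_mul]
  have h1 : t.drop c = repP p m := by
    have hd := repP_drop p (m + 1) (by omega)
    simp only [Nat.add_sub_cancel] at hd
    rw [ht, ← hp, hd]
  have hlen2 : (repP p m).length = t.length - c := by
    rw [repP_length, hp]; omega
  have h2 : t.take (t.length - c) = repP p m := by
    conv_lhs => rw [← hlen2, ht, repP_succ']
    exact List.take_left
  rw [h1, h2]

-- characterisation of A's while loop: it reaches n iff the rest of the string is a repetition of p
theorem answerWhile_eq_iff (t p : List Char) (c : Nat) (hc : 0 < c) (hp : p.length = c) :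
    ∀ (d i : Nat), t.length - i = d → i ≤ t.length → c ∣ (t.length - i) →
      (answerWhile t p c i = t.length ↔ t.drop i = repP p ((t.length - i) / c)) := by
  intro d
  induction d using Nat.strong_induction_on with
  | _ d ih =>
  intro i hd hile hdvd
  rw [answerWhile]
  by_cases hguard : i + c ≤ t.length
  · rw [dif_pos ⟨hc, hguard⟩]
    obtain ⟨q, hq⟩ := hdvd
    have hq1 : 1 ≤ q := by
      rcases Nat.eq_zero_or_pos q with h0 | h
      · subst h0; omega
      · exact h
    obtain ⟨q', rfl⟩ : ∃ q', q = q' + 1 := ⟨q - 1, by omega⟩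
    rw [Nat.mul_succ] at hq
    have hdivq : (t.length - i) / c = q' + 1 := by
      rw [hq, ← Nat.mul_succ, Nat.mul_div_cancel_left _ hc]
    have hsub : t.length - (i + c) = c * q' := by omega
    have hdivq' : (t.length - (i + c)) / c = q' := by
      rw [hsub, Nat.mul_div_cancel_left _ hc]
    by_cases hchunk : (t.drop i).take c = p
    · rw [if_pos hchunk]
      have hrec := ih (t.length - (i + c)) (by omega) (i + c) rfl (by omega) ⟨q', hsub⟩
      rw [hrec, hdivq, hdivq']
      constructor
      · intro h
        calc t.drop i = (t.drop i).take c ++ (t.drop i).drop c :=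
              (List.take_append_drop c (t.drop i)).symm
          _ = p ++ t.drop (i + c) := by rw [hchunk, List.drop_drop]
          _ = p ++ repP p q' := by rw [h]
          _ = repP p (q' + 1) := (repP_succ _ _).symm
      · intro h
        have hdd : t.drop (i + c) = (t.drop i).drop c := by rw [List.drop_drop]
        have hrd := repP_drop p (q' + 1) (by omega)
        rw [hp] at hrd
        rw [hdd, h, hrd]
        simp
    · rw [if_neg hchunk]
      constructor
      · intro h; omega
      · intro h
        exfalso
        apply hchunk
        have hrt := repP_take p ((t.length - i) / c) (by rw [hdivq]; omega)
        rw [hp] at hrt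
        rw [h, hrt]
  · rw [dif_neg (by omega)]
    have hzero : t.length - i = 0 := Nat.eq_zero_of_dvd_of_lt hdvd (by omega)
    have hin : i = t.length := by omega
    subst hin
    simp [List.drop_length, repP_zero]

-- bridge: for a divisor chunk length c, A's while-loop check equals B's shift-overlap check
theorem inner_check_iff (t : List Char) (c : Nat) (hc : 0 < c) (hdvd : c ∣ t.length)
    (hcle : c ≤ t.length) :
    (answerWhile t (t.take c) c c = t.length ↔ t.drop c = t.take (t.length - c)) := by
  have hp : (t.take c).length = c := by
    rw [List.length_take]; omega
  obtain ⟨q, hq⟩ := hdvd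
  have hq1 : 1 ≤ q := by
    rcases Nat.eq_zero_or_pos q with h0 | h
    · subst h0; omega
    · exact h
  obtain ⟨q', rfl⟩ : ∃ q', q = q' + 1 := ⟨q - 1, by omega⟩
  rw [Nat.mul_succ] at hq
  have hsub : t.length - c = c * q' := by omega
  have hdivsub : (t.length - c) / c = q' := by
    rw [hsub, Nat.mul_div_cancel_left _ hc]
  have hwhile := answerWhile_eq_iff t (t.take c) c hc hp (t.length - c) c rfl hcle ⟨q', hsub⟩
  rw [hwhile, hdivsub]
  constructor
  · intro h
    have ht : t = repP (t.take c) (q' + 1) := by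
      calc t = t.take c ++ t.drop c := (List.take_append_drop c t).symm
        _ = t.take c ++ repP (t.take c) q' := by rw [h]
        _ = repP (t.take c) (q' + 1) := (repP_succ _ _).symm
    exact rep_to_shift c q' t (t.take c) hp ht
  · intro h
    have hlen' : t.length = c * (q' + 1) := by rw [Nat.mul_succ]; omega
    have ht := shift_to_rep c hc (q' + 1) t hlen' h
    have hrd := repP_drop (t.take c) (q' + 1) (by omega)
    rw [hp] at hrd
    conv_lhs => rw [ht, hrd]
    simp

-- the predicate both programs decide for a candidate chunk length c
def goodC (t : List Char) (c : Nat) : Prop :=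
  0 < c ∧ t.length % c = 0 ∧ t.drop c = t.take (t.length - c)

theorem goodC_full (t : List Char) (h : 0 < t.length) : goodC t t.length :=
  ⟨h, by simp [Nat.mod_self], by simp [List.drop_length]⟩

-- a foldl that keeps the last element satisfying Q keeps its accumulator when nothing satisfies Q
theorem foldl_pick_none (Q : Nat → Bool) :
    ∀ (l : List Nat) (a : Nat), (∀ k ∈ l, Q k = false) →
      l.foldl (fun acc k => if Q k then k else acc) a = a := by
  intro l
  induction l with
  | nil => intro a _; rfl
  | cons x xs ih =>
    intro a hnone
    simp only [List.foldl_cons]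
    rw [if_neg (by simp [hnone x (by simp)])]
    exact ih a (fun k hk => hnone k (by simp [hk]))

-- over a strictly increasing list, the last element satisfying Q is the greatest one
theorem foldl_pick_max (Q : Nat → Bool) (m : Nat) (hQ : Q m = true) :
    ∀ (l : List Nat) (a : Nat), m ∈ l → (∀ k ∈ l, Q k = true → k ≤ m) →
      l.Pairwise (· < ·) →
      l.foldl (fun acc k => if Q k then k else acc) a = m := by
  intro l
  induction l with
  | nil => intro a h; simp at h
  | cons x xs ih =>
    intro a hmem hub hpw
    have hpw' := List.pairwise_cons.mp hpw
    simp only [List.foldl_cons]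
    by_cases hxm : x = m
    · subst hxm
      rw [if_pos hQ]
      apply foldl_pick_none
      intro k hk
      by_contra hQk
      have h1 : k ≤ x := hub k (by simp [hk]) (by simpa using hQk)
      have h2 : x < k := hpw'.1 k hk
      omega
    · have hmxs : m ∈ xs := by
        rcases List.mem_cons.mp hmem with h | h
        · exact absurd h.symm hxm
        · exact h
      exact ih _ hmxs (fun k hk => hub k (by simp [hk])) hpw'.2

-- B's loop runs up to the least good chunk length and returns n / it
theorem altGo_run (t : List Char) (cm : Nat) (hg : goodC t cm) (hcmn : cm ≤ t.length) :
    ∀ (d c : Nat), cm - c = d → 0 < c → c ≤ cm →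
      (∀ c', c ≤ c' → c' < cm → ¬ goodC t c') →
      altGo t t.length c = ((t.length / cm : Nat) : Int) := by
  intro d
  induction d using Nat.strong_induction_on with
  | _ d ih =>
  intro c hd hc hccm hmin
  rw [altGo]
  rw [if_pos (by omega)]
  by_cases hcond : t.length % c = 0 ∧ t.drop c = t.take (t.length - c)
  · rw [if_pos hcond]
    have hceq : c = cm := by
      by_contra hne
      exact hmin c (le_refl c) (by omega) ⟨hc, hcond.1, hcond.2⟩
    rw [hceq]
  · rw [if_neg hcond]
    have hne : c ≠ cm := by
      intro h; subst h; exact hcond ⟨hg.2.1, hg.2.2⟩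
    exact ih (cm - (c + 1)) (by omega) (c + 1) rfl (by omega) (by omega)
      (fun c' h1 h2 => hmin c' (by omega) h2)

-- ===== VERDICT (by name: the statement is the Claim_ definition above) =====
theorem answer_spec : Claim_equal_answer := by
  intro s _
  unfold Spec_answer
  simp only [answer, answer_alt]
  set t := s.toList with ht
  rcases Nat.eq_zero_or_pos t.length with hn0 | hn
  · rw [hn0, altGo]
    norm_num [List.range']
  · -- the least good chunk length
    letI : DecidablePred (goodC t) := fun c => by unfold goodC; infer_instance
    have hex : ∃ c, goodC t c := ⟨t.length, goodC_full t hn⟩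
    set cm := Nat.find hex with hcm
    have hgcm : goodC t cm := Nat.find_spec hex
    have hcmle : cm ≤ t.length := Nat.find_le (goodC_full t hn)
    have hcm0 : 0 < cm := hgcm.1
    have hcmdvd : cm ∣ t.length := Nat.dvd_of_mod_eq_zero hgcm.2.1
    have hmin : ∀ c', c' < cm → ¬ goodC t c' := fun c' h => Nat.find_min hex h
    -- B returns n / cm
    have hB : altGo t t.length 1 = ((t.length / cm : Nat) : Int) :=
      altGo_run t cm hgcm hcmle (cm - 1) 1 rfl (by omega) (by omega)
        (fun c' _ h2 => hmin c' h2)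
    rw [hB]
    -- A's loop body, rewritten through inner_check_iff as a pure test of k
    set Q : Nat → Bool := fun k =>
      decide (t.length % k = 0 ∧ t.drop (t.length / k) = t.take (t.length - t.length / k))
      with hQdef
    have hcongr : (List.range' 1 t.length).foldl (fun maxSplit k =>
        if t.length % k ≠ 0 then maxSplit
        else
          let c := t.length / k
          let first := t.take c
          let i := answerWhile t first c c
          if i = t.length then k else maxSplit) 0
        = (List.range' 1 t.length).foldl (fun acc k => if Q k then k else acc) 0 := by
      apply PySem.List.foldl_congr_mem
      intro a b hb
      have hbmem : 1 ≤ b ∧ b ≤ t.length := by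
        rw [List.mem_range'] at hb
        obtain ⟨j, hj, rfl⟩ := hb
        omega
      simp only []
      by_cases hk : t.length % b = 0
      · have hbdvd : b ∣ t.length := Nat.dvd_of_mod_eq_zero hk
        have hc0 : 0 < t.length / b := Nat.div_pos hbmem.2 (by omega)
        have hcdvd : t.length / b ∣ t.length := Nat.div_dvd_of_dvd hbdvd
        have hcle : t.length / b ≤ t.length := Nat.div_le_self _ _
        have hiff := inner_check_iff t (t.length / b) hc0 hcdvd hcle
        by_cases hcheck : t.drop (t.length / b) = t.take (t.length - t.length / b)
        · rw [if_neg (by omega), if_pos (hiff.mpr hcheck), if_pos (by simp [hQdef, hk, hcheck])]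
        · rw [if_neg (by omega), if_neg (fun h => hcheck (hiff.mp h)),
            if_neg (by simp [hQdef, hcheck])]
      · rw [if_pos hk, if_neg (by simp [hQdef, hk])]
    rw [hcongr]
    have hAfold : (List.range' 1 t.length).foldl (fun acc k => if Q k then k else acc) 0
        = t.length / cm := by
      apply foldl_pick_max
      · -- Q (n / cm) is true
        have hmdvd : t.length / cm ∣ t.length := Nat.div_dvd_of_dvd hcmdvd
        have hback : t.length / (t.length / cm) = cm :=
          Nat.div_div_self hcmdvd (by omega)
        simp only [hQdef, decide_eq_true_eq]
        refine ⟨Nat.mod_eq_zero_of_dvd hmdvd, ?_⟩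
        rw [hback]
        exact hgcm.2.2
      · rw [List.mem_range']
        refine ⟨t.length / cm - 1, ?_, ?_⟩
        · have h2 : t.length / cm ≤ t.length := Nat.div_le_self _ _
          have h1 : 0 < t.length / cm := Nat.div_pos hcmle hcm0
          omega
        · have h1 : 0 < t.length / cm := Nat.div_pos hcmle hcm0
          omega
      · intro k hkmem hQk
        rw [List.mem_range'] at hkmem
        obtain ⟨j, hj, rfl⟩ := hkmem
        simp only [hQdef, decide_eq_true_eq] at hQk
        have hkdvd : (1 + 1 * j) ∣ t.length := Nat.dvd_of_mod_eq_zero hQk.1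
        have hc0 : 0 < t.length / (1 + 1 * j) := Nat.div_pos (Nat.le_of_dvd hn hkdvd) (by omega)
        have hgc : goodC t (t.length / (1 + 1 * j)) :=
          ⟨hc0, Nat.mod_eq_zero_of_dvd (Nat.div_dvd_of_dvd hkdvd), hQk.2⟩
        have hcmlec : cm ≤ t.length / (1 + 1 * j) := by
          by_contra hlt
          exact hmin _ (by omega) hgc
        have hback : t.length / (t.length / (1 + 1 * j)) = 1 + 1 * j :=
          Nat.div_div_self hkdvd (by omega)
        calc 1 + 1 * j = t.length / (t.length / (1 + 1 * j)) := hback.symm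
          _ ≤ t.length / cm := Nat.div_le_div_left hcmlec hcm0
      · exact List.pairwise_lt_range' 1
    rw [hAfold]
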